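-- pv_equiv track=rewrite | github.com/DIG-Network/proof_research | sub-problems/anonymous-quorum-binding/experiments/polynomial-two-eval-small-n-injective-witness/script.py | find_collision_pair
-- ===== SOURCE A (Python) =====
-- def modinv(a: int, p: int) -> int:
--     return pow(a % p, p - 2, p)
--
-- def lagrange_basis_at(r: int, nodes: list[int], p: int) -> list[int]:
--     out: list[int] = []
--     for i, xi in enumerate(nodes):
--         num, den = 1, 1
--         for j, xj in enumerate(nodes):
--             if j == i:
--                 continue
--             num = (num * (r - xj)) % p
--             den = (den * (xi - xj)) % p
--         out.append((num * modinv(den, p)) % p)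
--     return out
--
-- def eval_at_r(vals: list[int], L: list[int], p: int) -> int:
--     return sum((vals[i] * L[i]) % p for i in range(len(vals))) % p
--
-- def find_collision_pair(r1: int, r2: int, n: int, p: int) -> tuple[list[int], list[int]] | None:
--     nodes = list(range(n))
--     L1 = lagrange_basis_at(r1, nodes, p)
--     L2 = lagrange_basis_at(r2, nodes, p)
--     seen: dict[tuple[int, int], list[int]] = {}
--     for mask in range(1 << n):
--         v = [(mask >> i) & 1 for i in range(n)]
--         key = (eval_at_r(v, L1, p), eval_at_r(v, L2, p))
--         if key in seen:
--             return seen[key], v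
--         seen[key] = v
--     return None
-- ===== SOURCE B (Python) =====
-- def _basis(r, n, p):
--     # Lagrange basis values L_i(r) mod p for nodes 0..n-1.
--     out = []
--     for i in range(n):
--         num, den = 1, 1
--         for j in range(n):
--             if j != i:
--                 num = num * (r - j) % p
--                 den = den * (i - j) % p
--         out.append(num * pow(den, p - 2, p) % p)
--     return out
--
-- def _vec(mask, n):
--     return [(mask >> i) & 1 for i in range(n)]
--
-- def find_collision_pair(r1, r2, n, p):
--     L1 = _basis(r1, n, p)
--     L2 = _basis(r2, n, p)
--     # eval(mask) = sum of L[i] over set bits of mask, mod p; computed in O(1) per mask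
--     # from the already-stored eval of mask with its top bit removed.
--     E1, E2 = [0], [0]
--     seen = {(0, 0): 0}
--     for mask in range(1, 1 << n):
--         k = mask.bit_length() - 1
--         low = mask - (1 << k)
--         e1 = (E1[low] + L1[k]) % p
--         e2 = (E2[low] + L2[k]) % p
--         if (e1, e2) in seen:
--             return _vec(seen[(e1, e2)], n), _vec(mask, n)
--         seen[(e1, e2)] = mask
--         E1.append(e1)
--         E2.append(e2)
--     return None
-- ===== Notes on version B (the rewrite author's own statement) =====
-- stated objective: alternative
-- what changed: Instead of rebuilding the 0/1 vector and re-summing both n-term polynomial evaluations for every mask, B memoizes the two evaluations of every scanned mask and obtains each new mask's pair in O(1) from the stored pair of the mask with its top bit removed (O(2^n) scan vs A's O(2^n*n); the shared O(n^2) basis setup dominates on inputs that collide early, so no overall speed is claimed), storing masks instead of vectors in the seen-dict and materializing the two witness vectors only on return.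
-- outside the precondition, e.g. on find_collision_pair(0, 0, 1, -3): A returns None, B returns None
import Mathlib
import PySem

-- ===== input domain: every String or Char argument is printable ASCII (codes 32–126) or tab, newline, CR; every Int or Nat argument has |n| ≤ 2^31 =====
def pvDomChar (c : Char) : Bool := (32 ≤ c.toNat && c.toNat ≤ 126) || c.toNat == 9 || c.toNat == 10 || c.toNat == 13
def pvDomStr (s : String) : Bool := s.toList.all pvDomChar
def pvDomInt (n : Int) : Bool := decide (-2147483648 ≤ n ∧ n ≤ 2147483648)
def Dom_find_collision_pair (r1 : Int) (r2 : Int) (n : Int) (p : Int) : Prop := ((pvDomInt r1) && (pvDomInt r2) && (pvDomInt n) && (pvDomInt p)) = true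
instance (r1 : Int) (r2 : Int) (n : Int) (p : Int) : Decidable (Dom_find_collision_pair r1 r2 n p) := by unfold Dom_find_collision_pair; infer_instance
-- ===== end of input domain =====

-- B replaces A's per-mask vector rebuild and two O(n) re-evaluations by memoized evaluations
-- updated in O(1) per mask from the mask with its top bit removed; same enumeration order.

-- ===== PORT A =====

-- Python pow(b, e, p) as both programs reach it under Pre_ (p ≥ 1): for p ≥ 2 the exponent
-- e = p-2 is ≥ 0 and pow is PySem.Int.powMod; e < 0 is reached only with p = 1, where
-- CPython returns pow(_, -1, 1) = 0.  Exact on the admitted domain.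
def pyPow3 (a : Int) (e : Int) (p : Int) : Int :=
  if e < 0 then 0 else PySem.Int.powMod a e.toNat p

def modinv (a : Int) (p : Int) : Int :=
  pyPow3 (PySem.Int.mod a p) (p - 2) p

def lagrange_basis_at (r : Int) (nodes : List Int) (p : Int) : List Int :=
  (PySem.List.enumerate nodes).foldl (fun out ix =>
    let nd := (PySem.List.enumerate nodes).foldl (fun nd jx =>
        if jx.1 == ix.1 then nd
        else (PySem.Int.mod (nd.1 * (r - jx.2)) p, PySem.Int.mod (nd.2 * (ix.2 - jx.2)) p))
      (1, 1)
    out ++ [PySem.Int.mod (nd.1 * modinv nd.2 p) p]) []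

def eval_at_r (vals : List Int) (L : List Int) (p : Int) : Int :=
  PySem.Int.mod ((PySem.List.pyRange 0 (PySem.List.len vals) 1).foldl
    (fun s i => s + PySem.Int.mod (PySem.List.pyGetD vals i 0 * PySem.List.pyGetD L i 0) p) 0) p

-- the loop 'for mask in range(1 << n)' with its early return; (mask >> i) & 1 is ported as
-- mask // 2**i % 2 (exact: Python defines x >> i = x // 2**i, and x & 1 = x % 2 on every int)
def findLoopA (L1 L2 : List Int) (n p : Int) :
    Int → Nat → PySem.Dict (Int × Int) (List Int) → Option (List Int × List Int)
  | _, 0, _ => none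
  | mask, fuel + 1, seen =>
    let v := (PySem.List.pyRange 0 n 1).map
      (fun i => PySem.Int.mod (PySem.Int.floordiv mask (2 ^ i.toNat)) 2)
    let key := (eval_at_r v L1 p, eval_at_r v L2 p)
    match seen.get? key with
    | some w => some (w, v)
    | none => findLoopA L1 L2 n p (mask + 1) fuel (seen.insert key v)

def find_collision_pair (r1 : Int) (r2 : Int) (n : Int) (p : Int) : Option (List Int × List Int) :=
  let nodes := PySem.List.pyRange 0 n 1
  let L1 := lagrange_basis_at r1 nodes p
  let L2 := lagrange_basis_at r2 nodes p
  findLoopA L1 L2 n p 0 ((1 : Int) <<< n.toNat).toNat PySem.Dict.empty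

-- ===== PORT B =====

def pvBasis (r : Int) (n : Int) (p : Int) : List Int :=
  (PySem.List.pyRange 0 n 1).foldl (fun out i =>
    let nd := (PySem.List.pyRange 0 n 1).foldl (fun nd j =>
        if j != i then (PySem.Int.mod (nd.1 * (r - j)) p, PySem.Int.mod (nd.2 * (i - j)) p)
        else nd)
      (1, 1)
    out ++ [PySem.Int.mod (nd.1 * pyPow3 nd.2 (p - 2) p) p]) []

def pvVec (mask : Int) (n : Int) : List Int :=
  (PySem.List.pyRange 0 n 1).map
    (fun i => PySem.Int.mod (PySem.Int.floordiv mask (2 ^ i.toNat)) 2)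

-- the loop 'for mask in range(1, 1 << n)'; every reached mask is ≥ 1, so
-- k = mask.bit_length() - 1 ≥ 0 and '1 << k' is 1 <<< k.toNat exactly
def findLoopB (L1 L2 : List Int) (n p : Int) :
    Int → Nat → List Int → List Int → PySem.Dict (Int × Int) Int → Option (List Int × List Int)
  | _, 0, _, _, _ => none
  | mask, fuel + 1, E1, E2, seen =>
    let k : Int := (PySem.Int.bitLength mask : Int) - 1
    let low := mask - ((1 : Int) <<< k.toNat)
    let e1 := PySem.Int.mod (PySem.List.pyGetD E1 low 0 + PySem.List.pyGetD L1 k 0) p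
    let e2 := PySem.Int.mod (PySem.List.pyGetD E2 low 0 + PySem.List.pyGetD L2 k 0) p
    match seen.get? (e1, e2) with
    | some m' => some (pvVec m' n, pvVec mask n)
    | none =>
      findLoopB L1 L2 n p (mask + 1) fuel (E1 ++ [e1]) (E2 ++ [e2]) (seen.insert (e1, e2) mask)

def find_collision_pair_alt (r1 : Int) (r2 : Int) (n : Int) (p : Int) : Option (List Int × List Int) :=
  let L1 := pvBasis r1 n p
  let L2 := pvBasis r2 n p
  findLoopB L1 L2 n p 1 (((1 : Int) <<< n.toNat).toNat - 1) [0] [0]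
    (PySem.Dict.mk [((0, 0), 0)])

-- ===== PRECONDITION & SPEC =====
-- Pre_ excludes n < 0, where A raises ValueError on 1 << n, and p ≤ 0, where A raises
-- ZeroDivisionError (p = 0) or usually ValueError from pow(den, p-2, p) with a negative
-- modulus (whether a negative p raises depends on gcds of the computed denominators, not on a
-- closed-form input condition, so all p ≤ 0 are excluded; on the few returning cases, e.g.
-- (0,0,1,-3), A and B agree).
def Pre_find_collision_pair (r1 : Int) (r2 : Int) (n : Int) (p : Int) : Prop :=
  0 ≤ n ∧ 1 ≤ p
instance (r1 : Int) (r2 : Int) (n : Int) (p : Int) : Decidable (Pre_find_collision_pair r1 r2 n p) := by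
  unfold Pre_find_collision_pair; infer_instance

def pvWitness_find_collision_pair : Int × Int × Int × Int := (5, 9, 2, 7)

def Spec_find_collision_pair (r1 : Int) (r2 : Int) (n : Int) (p : Int) (out : Option (List Int × List Int)) : Prop := out = find_collision_pair_alt r1 r2 n p
instance (r1 : Int) (r2 : Int) (n : Int) (p : Int) (out : Option (List Int × List Int)) : Decidable (Spec_find_collision_pair r1 r2 n p out) := by unfold Spec_find_collision_pair; infer_instance

-- ===== CLAIM (what is proved, stated in full; the proofs are below) =====
def Claim_equal_find_collision_pair : Prop := ∀ (r1 : Int) (r2 : Int) (n : Int) (p : Int), Dom_find_collision_pair r1 r2 n p → Pre_find_collision_pair r1 r2 n p → Spec_find_collision_pair r1 r2 n p (find_collision_pair r1 r2 n p)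


-- ===== LEMMAS AND PROOFS =====

-- canonical value: bit i of mask m, and the subset sum of L over the set bits of m, mod p
def pvBit (m i : Nat) : Int := ((m / 2 ^ i % 2 : Nat) : Int)
def pvS (m : Nat) (L : List Int) : Int :=
  ((List.range L.length).map (fun i => pvBit m i * L.getD i 0)).sum
def pvE (m : Nat) (L : List Int) (p : Int) : Int := pvS m L % p

theorem pvPow3_mod_base (a e p : Int) (hp : 0 < p) :
    pyPow3 (PySem.Int.mod a p) e p = pyPow3 a e p := by
  unfold pyPow3
  split
  · rfl
  · show PySem.Int.powMod (PySem.Int.mod a p) e.toNat p = PySem.Int.powMod a e.toNat p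
    unfold PySem.Int.powMod
    rw [PySem.Int.mod_eq_emod_of_pos hp, PySem.Int.mod_eq_emod_of_pos hp,
        PySem.Int.mod_eq_emod_of_pos hp]
    exact (Int.ModEq.pow e.toNat (Int.emod_emod_of_dvd a dvd_rfl))

theorem pv_basis_eq (r n p : Int) (hp : 1 ≤ p) :
    lagrange_basis_at r (PySem.List.pyRange 0 n 1) p = pvBasis r n p := by
  have hen : PySem.List.enumerate (PySem.List.pyRange 0 n 1)
      = (PySem.List.pyRange 0 n 1).map (fun i => (i, i)) := by
    apply List.ext_getElem?
    intro k
    rw [PySem.List.getElem?_enumerate, List.getElem?_map, PySem.List.getElem?_pyRange_one]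
    split <;> simp
  simp only [lagrange_basis_at, pvBasis, hen,
    PySem.List.foldl_append_singleton_eq_map (l := (PySem.List.pyRange 0 n 1).map (fun i => (i, i))),
    PySem.List.foldl_append_singleton_eq_map (l := PySem.List.pyRange 0 n 1),
    List.nil_append, List.map_map]
  apply List.map_congr_left
  intro i _
  simp only [Function.comp_apply, List.foldl_map]
  have hfold :
      List.foldl (fun (nd : Int × Int) (j : Int) =>
          if (j == i) = true then nd
          else (PySem.Int.mod (nd.1 * (r - j)) p, PySem.Int.mod (nd.2 * (i - j)) p))
        (1, 1) (PySem.List.pyRange 0 n 1)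
      = List.foldl (fun (nd : Int × Int) (j : Int) =>
          if (j != i) = true then (PySem.Int.mod (nd.1 * (r - j)) p, PySem.Int.mod (nd.2 * (i - j)) p)
          else nd)
        (1, 1) (PySem.List.pyRange 0 n 1) := by
    apply PySem.List.foldl_congr_mem
    intro acc x _
    by_cases h : x = i <;> simp [h]
  rw [← hfold]
  congr 1
  rw [modinv, pvPow3_mod_base _ _ _ (by omega)]

theorem pv_basis_len (r n p : Int) : (pvBasis r n p).length = n.toNat := by
  simp only [pvBasis, PySem.List.foldl_append_singleton_eq_map, List.nil_append,
    List.length_map, PySem.List.length_pyRange_one]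
  omega

theorem pv_sum_mod {alpha : Type} (l : List alpha) (g : alpha → Int) (p : Int) :
    ((l.map (fun x => g x % p)).sum) % p = ((l.map g).sum) % p := by
  induction l with
  | nil => rfl
  | cons a l ih =>
    simp only [List.map_cons, List.sum_cons]
    rw [Int.add_emod, Int.emod_emod_of_dvd _ dvd_rfl, ih, ← Int.add_emod]

theorem pv_range_cast (n : Int) :
    PySem.List.pyRange 0 n 1 = (List.range n.toNat).map (fun (k : Nat) => (k : Int)) := by
  rw [PySem.List.pyRange_one]
  simp only [zero_add, sub_zero]

theorem pv_vec_eq (m : Nat) (n : Int) :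
    pvVec (m : Int) n = (List.range n.toNat).map (fun k => pvBit m k) := by
  unfold pvVec
  rw [pv_range_cast, List.map_map]
  apply List.map_congr_left
  intro k _
  simp only [Function.comp_apply, Int.toNat_natCast]
  have h2 : ((2 : Int) ^ k) = ((2 ^ k : Nat) : Int) := by push_cast; ring
  rw [h2, PySem.Int.floordiv_natCast, show (2 : Int) = ((2 : Nat) : Int) from rfl,
      PySem.Int.mod_natCast]
  rfl

theorem pv_eval_eq (m : Nat) (n p : Int) (hp : 1 ≤ p) (L : List Int)
    (hL : L.length = n.toNat) :
    eval_at_r (pvVec (m : Int) n) L p = pvE m L p := by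
  unfold eval_at_r
  rw [pv_vec_eq]
  have hlen : PySem.List.len ((List.range n.toNat).map (fun k => pvBit m k)) = (n.toNat : Int) := by
    simp [PySem.List.len_eq]
  rw [hlen, pv_range_cast ((n.toNat : Int)), Int.toNat_natCast, List.foldl_map]
  have hcong :
      List.foldl (fun (s : Int) (k : Nat) =>
          s + PySem.Int.mod (PySem.List.pyGetD ((List.range n.toNat).map (fun k => pvBit m k)) ((k : Nat) : Int) 0
              * PySem.List.pyGetD L ((k : Nat) : Int) 0) p)
        0 (List.range n.toNat)
      = List.foldl (fun (s : Int) (k : Nat) =>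
          s + PySem.Int.mod (pvBit m k * L.getD k 0) p) 0 (List.range n.toNat) := by
    apply PySem.List.foldl_congr_mem
    intro acc k hk
    rw [PySem.List.pyGetD_natCast, PySem.List.pyGetD_natCast,
        PySem.List.getD_map_range _ _ _ _ (List.mem_range.mp hk)]
  rw [hcong, PySem.List.foldl_add _ (fun k => PySem.Int.mod (pvBit m k * L.getD k 0) p) 0,
      zero_add]
  have hp0 : (0 : Int) < p := by omega
  simp only [PySem.Int.mod_eq_emod_of_pos hp0]
  rw [pv_sum_mod (List.range n.toNat) (fun k => pvBit m k * L.getD k 0) p]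
  unfold pvE pvS
  rw [hL]

theorem pv_bit_high_zero (l m : Nat) (hm : m < 2 ^ l) : pvBit m l = 0 := by
  unfold pvBit
  rw [Nat.div_eq_of_lt hm]
  rfl

theorem pv_bit_low (l i m : Nat) (hi : i < l) : pvBit (2 ^ l + m) i = pvBit m i := by
  unfold pvBit
  have h1 : 2 ^ l + m = m + 2 ^ (l - i) * 2 ^ i := by
    rw [← pow_add]
    have h : l - i + i = l := by omega
    rw [h]; omega
  rw [h1, Nat.add_mul_div_right _ _ (Nat.two_pow_pos i)]
  have h2 : 2 ^ (l - i) = 2 ^ (l - i - 1) * 2 := by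
    rw [← pow_succ]
    congr 1
    omega
  rw [h2, Nat.add_mul_mod_self_right]

theorem pv_bit_top (l m : Nat) (hm : m < 2 ^ l) : pvBit (2 ^ l + m) l = 1 := by
  unfold pvBit
  have h1 : 2 ^ l + m = m + 1 * 2 ^ l := by omega
  rw [h1, Nat.add_mul_div_right _ _ (Nat.two_pow_pos l), Nat.div_eq_of_lt hm]
  rfl

theorem pv_S_split (L : List Int) (k m : Nat) (hk : k < L.length) (hm : m < 2 ^ k) :
    pvS (2 ^ k + m) L = pvS m L + L.getD k 0 := by
  unfold pvS
  obtain ⟨t, ht⟩ : ∃ t, L.length = (k + 1) + t := ⟨L.length - k - 1, by omega⟩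
  rw [ht, List.range_add, List.range_succ]
  simp only [List.map_append, List.sum_append, List.map_map, List.map_cons, List.map_nil,
    List.sum_cons, List.sum_nil]
  have hA : (List.range k).map (fun i => pvBit (2 ^ k + m) i * L.getD i 0)
      = (List.range k).map (fun i => pvBit m i * L.getD i 0) := by
    apply List.map_congr_left
    intro i hi
    rw [pv_bit_low k i m (List.mem_range.mp hi)]
  have hB : (List.range t).map ((fun i => pvBit (2 ^ k + m) i * L.getD i 0) ∘ (fun i => k + 1 + i))
      = (List.range t).map ((fun i => pvBit m i * L.getD i 0) ∘ (fun i => k + 1 + i)) := by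
    apply List.map_congr_left
    intro i _
    simp only [Function.comp_apply]
    have hlt1 : 2 ^ k + m < 2 ^ (k + 1) := by
      rw [pow_succ]
      omega
    have hle : 2 ^ (k + 1) ≤ 2 ^ (k + 1 + i) := Nat.pow_le_pow_right (by norm_num) (by omega)
    rw [pv_bit_high_zero (k + 1 + i) (2 ^ k + m) (by omega),
        pv_bit_high_zero (k + 1 + i) m (by omega)]
  rw [hA, hB, pv_bit_top k m hm, pv_bit_high_zero k m hm]
  ring

theorem pv_E_zero (L : List Int) (p : Int) : pvE 0 L p = 0 := by
  unfold pvE pvS pvBit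
  simp

theorem pv_E_step (L : List Int) (p : Int) (k m : Nat) (hk : k < L.length) (hm : m < 2 ^ k) :
    (pvE m L p + L.getD k 0) % p = pvE (2 ^ k + m) L p := by
  unfold pvE
  rw [pv_S_split L k m hk hm, Int.emod_add_emod]

theorem pv_get_map (l : List ((Int × Int) × Int)) (g : Int → List Int) (k : Int × Int) :
    (PySem.Dict.mk (l.map (fun kv => (kv.1, g kv.2)))).get? k
      = ((PySem.Dict.mk l).get? k).map g := by
  induction l with
  | nil => rfl
  | cons a l ih =>
    obtain ⟨k', v⟩ := a
    simp only [List.map_cons]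
    rw [PySem.Dict.get?_mk_cons, PySem.Dict.get?_mk_cons]
    split
    · rfl
    · exact ih

theorem pv_loop (L1 L2 : List Int) (n p : Int) (hp : 1 ≤ p)
    (h1 : L1.length = n.toNat) (h2 : L2.length = n.toNat) :
    ∀ (fuel m : Nat) (dB : PySem.Dict (Int × Int) Int), 1 ≤ m → m + fuel ≤ 2 ^ n.toNat →
      findLoopA L1 L2 n p (m : Int) fuel
          (PySem.Dict.mk (dB.items.map (fun kv => (kv.1, pvVec kv.2 n))))
        = findLoopB L1 L2 n p (m : Int) fuel
            ((List.range m).map (fun j => pvE j L1 p))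
            ((List.range m).map (fun j => pvE j L2 p)) dB := by
  intro fuel
  induction fuel with
  | zero => intro m dB _ _; rfl
  | succ fuel ih =>
    intro m dB hm1 hmf
    simp only [findLoopA, findLoopB]
    have hv : ((PySem.List.pyRange 0 n 1).map
        (fun i => PySem.Int.mod (PySem.Int.floordiv (m : Int) (2 ^ i.toNat)) 2)) = pvVec (m : Int) n := rfl
    rw [hv, pv_eval_eq m n p hp L1 h1, pv_eval_eq m n p hp L2 h2]
    -- bit-length facts for the reached mask m ≥ 1
    have hmAbs : ((m : Int)).natAbs = m := Int.natAbs_natCast m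
    have hlt : m < 2 ^ PySem.Int.bitLength (m : Int) := by
      have h := PySem.Int.lt_two_pow_bitLength (m : Int)
      rwa [hmAbs] at h
    have hge : 2 ^ (PySem.Int.bitLength (m : Int) - 1) ≤ m := by
      have h := PySem.Int.two_pow_bitLength_le (m : Int) (Nat.cast_ne_zero.mpr (by omega))
      rwa [hmAbs] at h
    have hbl1 : 1 ≤ PySem.Int.bitLength (m : Int) := by
      rcases Nat.eq_zero_or_pos (PySem.Int.bitLength (m : Int)) with h0 | h
      · rw [h0] at hlt
        simp at hlt
        omega
      · exact h
    set bl := PySem.Int.bitLength (m : Int) with hbl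
    have hkNat : ((bl : Int) - 1) = (((bl - 1 : Nat)) : Int) := by
      rw [Nat.cast_sub hbl1]
      simp
    rw [hkNat, Int.toNat_natCast,
        show ((1 : Int) <<< (bl - 1)) = ((2 ^ (bl - 1) : Nat) : Int) by
          rw [Int.shiftLeft_eq, one_mul]; push_cast; ring,
        show ((m : Int) - ((2 ^ (bl - 1) : Nat) : Int)) = ((m - 2 ^ (bl - 1) : Nat) : Int) by
          rw [Nat.cast_sub hge],
        PySem.List.pyGetD_natCast, PySem.List.pyGetD_natCast,
        PySem.List.pyGetD_natCast, PySem.List.pyGetD_natCast]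
    have hpow1 : 1 ≤ 2 ^ (bl - 1) := Nat.one_le_two_pow
    have hlow : m - 2 ^ (bl - 1) < m := by omega
    rw [PySem.List.getD_map_range _ _ _ _ hlow, PySem.List.getD_map_range _ _ _ _ hlow]
    have hp0 : (0 : Int) < p := by omega
    have hkL : bl - 1 < n.toNat := by
      have hmN : m < 2 ^ n.toNat := by omega
      have : 2 ^ (bl - 1) < 2 ^ n.toNat := lt_of_le_of_lt hge hmN
      exact (Nat.pow_lt_pow_iff_right (by norm_num)).mp this
    have hm' : m - 2 ^ (bl - 1) < 2 ^ (bl - 1) := by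
      have hbl2 : 2 ^ bl = 2 ^ (bl - 1) * 2 := by
        rw [← pow_succ]
        congr 1
        omega
      omega
    have hsum : 2 ^ (bl - 1) + (m - 2 ^ (bl - 1)) = m := by omega
    have hkey1 : PySem.Int.mod (pvE (m - 2 ^ (bl - 1)) L1 p + L1.getD (bl - 1) 0) p
        = pvE m L1 p := by
      rw [PySem.Int.mod_eq_emod_of_pos hp0,
          pv_E_step L1 p (bl - 1) (m - 2 ^ (bl - 1)) (by omega) hm', hsum]
    have hkey2 : PySem.Int.mod (pvE (m - 2 ^ (bl - 1)) L2 p + L2.getD (bl - 1) 0) p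
        = pvE m L2 p := by
      rw [PySem.Int.mod_eq_emod_of_pos hp0,
          pv_E_step L2 p (bl - 1) (m - 2 ^ (bl - 1)) (by omega) hm', hsum]
    rw [hkey1, hkey2, pv_get_map dB.items (fun x => pvVec x n),
        show PySem.Dict.mk dB.items = dB from rfl]
    cases hg : dB.get? (pvE m L1 p, pvE m L2 p) with
    | some w => simp
    | none =>
      simp only [Option.map_none]
      have hcB : dB.contains (pvE m L1 p, pvE m L2 p) = false :=
        (PySem.Dict.get?_eq_none_iff_contains dB _).mp hg
      have hcA : (PySem.Dict.mk (dB.items.map (fun kv => (kv.1, pvVec kv.2 n)))).contains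
          (pvE m L1 p, pvE m L2 p) = false := by
        apply (PySem.Dict.get?_eq_none_iff_contains _ _).mp
        rw [pv_get_map dB.items (fun x => pvVec x n),
            show PySem.Dict.mk dB.items = dB from rfl, hg]
        rfl
      have hins : (PySem.Dict.mk (dB.items.map (fun kv => (kv.1, pvVec kv.2 n)))).insert
            (pvE m L1 p, pvE m L2 p) (pvVec (m : Int) n)
          = PySem.Dict.mk ((dB.insert (pvE m L1 p, pvE m L2 p) (m : Int)).items.map
              (fun kv => (kv.1, pvVec kv.2 n))) := by
        apply PySem.Dict.ext
        rw [PySem.Dict.items_insert_of_not_contains _ _ hcA,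
            PySem.Dict.items_insert_of_not_contains _ _ hcB]
        simp
      have hE1 : (List.range m).map (fun j => pvE j L1 p) ++ [pvE m L1 p]
          = (List.range (m + 1)).map (fun j => pvE j L1 p) := by
        rw [List.range_succ, List.map_append]
        rfl
      have hE2 : (List.range m).map (fun j => pvE j L2 p) ++ [pvE m L2 p]
          = (List.range (m + 1)).map (fun j => pvE j L2 p) := by
        rw [List.range_succ, List.map_append]
        rfl
      rw [hins, hE1, hE2, show ((m : Int) + 1) = ((m + 1 : Nat) : Int) by push_cast; ring]
      exact ih (m + 1) _ (by omega) (by omega)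

theorem pv_main (r1 r2 n p : Int) (_hn : 0 ≤ n) (hp : 1 ≤ p) :
    find_collision_pair r1 r2 n p = find_collision_pair_alt r1 r2 n p := by
  simp only [find_collision_pair, find_collision_pair_alt]
  rw [pv_basis_eq r1 n p hp, pv_basis_eq r2 n p hp]
  have hfuel : ((1 : Int) <<< n.toNat).toNat = 2 ^ n.toNat := by
    rw [Int.shiftLeft_eq, one_mul,
        show ((2 : Int) ^ n.toNat) = ((2 ^ n.toNat : Nat) : Int) by push_cast; ring,
        Int.toNat_natCast]
  rw [hfuel]
  have hpos : 1 ≤ 2 ^ n.toNat := Nat.one_le_two_pow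
  obtain ⟨f, hf⟩ : ∃ f, 2 ^ n.toNat = f + 1 := ⟨2 ^ n.toNat - 1, by omega⟩
  rw [hf]
  simp only [findLoopA]
  have hv0 : ((PySem.List.pyRange 0 n 1).map
      (fun i => PySem.Int.mod (PySem.Int.floordiv (0 : Int) (2 ^ i.toNat)) 2))
      = pvVec (((0 : Nat)) : Int) n := by
    rw [Nat.cast_zero]
    rfl
  rw [hv0, pv_eval_eq 0 n p hp _ (pv_basis_len r1 n p),
      pv_eval_eq 0 n p hp _ (pv_basis_len r2 n p), pv_E_zero, pv_E_zero]
  have hget : (PySem.Dict.empty : PySem.Dict (Int × Int) (List Int)).get? (0, 0) = none := rfl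
  rw [hget]
  have h := pv_loop (pvBasis r1 n p) (pvBasis r2 n p) n p hp (pv_basis_len r1 n p)
    (pv_basis_len r2 n p) f 1 (PySem.Dict.mk [((0, 0), (0 : Int))]) (le_refl 1) (by omega)
  simp only [List.range_one, List.map_cons, List.map_nil, pv_E_zero] at h
  simpa using h

-- ===== VERDICT (by name: the statement is the Claim_ definition above) =====
theorem find_collision_pair_spec : Claim_equal_find_collision_pair := by
  intro r1 r2 n p _ hpre
  unfold Spec_find_collision_pair
  exact pv_main r1 r2 n p hpre.1 hpre.2
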